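-- pv_equiv track=rewrite | github.com/donghyeon95/- | 7주차/심동민_풀이/menu_renewal.py | solution
-- ===== SOURCE A (Python) =====
-- from itertools import combinations
-- from collections import Counter
--
-- def solution(orders, course):
--     answer = []
--
--     for c in course:
--         temp = []
--         for order in orders:
--             temp += combinations(sorted(order), c)
--
--         if temp:
--             orderCount = Counter(temp)
--
--             max_ = max(orderCount.values())
--
--             if max_ >= 2:
--                 for key, value in orderCount.items():
--                     if orderCount[key] == max_:
--                         answer.append(''.join(key))
--
--     answer.sort()
--
--     return answer
-- ===== SOURCE B (Python) =====
-- from itertools import combinations, groupby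
--
--
-- def solution(orders, course):
--     # Sort-and-scan instead of hash counting: for each size c, gather all
--     # c-combinations, SORT them, and find the winners by scanning equal runs
--     # (run length = multiplicity), tracking the best run on the fly.
--     answer = []
--     menus = [sorted(o) for o in orders]
--     for c in course:
--         combos = sorted(t for m in menus for t in combinations(m, c))
--         best, winners = 0, []
--         for key, grp in groupby(combos):
--             run = sum(1 for _ in grp)
--             if run > best:
--                 best, winners = run, [key]
--             elif run == best:
--                 winners.append(key)
--         if best >= 2:
--             answer.extend(''.join(w) for w in winners)
--     return sorted(answer)
-- ===== Notes on version B (the rewrite author's own statement) =====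
-- stated objective: alternative
-- what changed: B sorts every order once up front and, per size, finds the winners by sorting the collected combinations and scanning equal runs (run length = multiplicity, best run tracked on the fly), instead of A's re-sorting each order for every course entry and hash counting with Counter followed by max() and a filtering pass.
import Mathlib
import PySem

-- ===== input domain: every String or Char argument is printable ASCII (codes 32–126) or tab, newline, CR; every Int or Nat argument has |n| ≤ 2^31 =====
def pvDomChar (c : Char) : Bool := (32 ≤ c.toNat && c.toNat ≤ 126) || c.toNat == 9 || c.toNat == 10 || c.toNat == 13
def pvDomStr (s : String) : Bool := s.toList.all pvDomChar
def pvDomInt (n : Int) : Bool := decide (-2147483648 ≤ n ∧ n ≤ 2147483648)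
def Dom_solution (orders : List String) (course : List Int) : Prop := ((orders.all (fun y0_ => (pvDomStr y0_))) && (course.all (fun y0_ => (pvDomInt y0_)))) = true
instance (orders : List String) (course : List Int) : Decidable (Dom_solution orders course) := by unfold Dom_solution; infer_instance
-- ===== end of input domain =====

-- B finds each size's winners by sorting the collected combinations and scanning equal runs
-- (run length = multiplicity, best run tracked on the fly) instead of A's hash counting.

-- ===== PORT A =====
-- Port of A: for each c, collect combinations of every sorted order, count them,
-- and append every maximal combo (joined; ''.join of chars = String.ofList) when the max is ≥ 2.
def solution (orders : List String) (course : List Int) : List String :=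
  let answer := course.foldl (fun answer c =>
    let temp := orders.foldl (fun temp order =>
      temp ++ PySem.List.combinations (PySem.List.sorted order.toList (fun x => x) false) c.toNat) []
    if temp ≠ [] then
      let orderCount := PySem.Dict.counter temp
      match PySem.List.max? orderCount.values (fun v => v) with
      | some max_ =>
        if 2 ≤ max_ then
          orderCount.items.foldl
            (fun ans kv => if orderCount.getD kv.1 0 = max_ then ans ++ [String.ofList kv.1] else ans)
            answer
        else answer
      | none => answer  -- unreachable: guarded by temp ≠ []
    else answer) []
  PySem.List.sorted answer (fun x => x) false

-- ===== PORT B =====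
-- itertools.groupby consumed by run = sum(1 for _ in grp): the (key, run-length)
-- pairs of the maximal runs of equal adjacent elements, exact step for step.
def groupsOf : List (List Char) → List (List Char × Int)
  | [] => []
  | y :: rest =>
      (y, ((rest.takeWhile (fun z => z == y)).length : Int) + 1) ::
        groupsOf (rest.dropWhile (fun z => z == y))
termination_by ys => ys.length
decreasing_by
  exact Nat.lt_succ_of_le (List.length_dropWhile_le _ _)

def solution_alt (orders : List String) (course : List Int) : List String :=
  let menus := orders.map (fun o => PySem.List.sorted o.toList (fun x => x) false)
  let answer := course.foldl (fun answer c =>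
    let combos := PySem.List.sorted
      (menus.flatMap (fun m => PySem.List.combinations m c.toNat)) (fun x => x) false
    let bw := (groupsOf combos).foldl
      (fun (bw : Int × List (List Char)) g =>
        if bw.1 < g.2 then (g.2, [g.1])
        else if g.2 = bw.1 then (bw.1, bw.2 ++ [g.1])
        else bw) (0, [])
    if 2 ≤ bw.1 then answer ++ bw.2.map (fun w => String.ofList w) else answer) []
  PySem.List.sorted answer (fun x => x) false

-- ===== PRECONDITION & SPEC =====
-- Pre_ excludes exactly the inputs on which Python A raises: with at least one order,
-- a negative size in course makes itertools.combinations raise ValueError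
-- (with no orders, combinations is never called and A returns []).
def Pre_solution (orders : List String) (course : List Int) : Prop :=
  orders = [] ∨ ∀ c ∈ course, 0 ≤ c
instance (orders : List String) (course : List Int) : Decidable (Pre_solution orders course) := by unfold Pre_solution; infer_instance
def pvWitness_solution : List String × List Int := (["ABCFG", "AC", "CDE", "ACDE", "BCFG", "ACDEH"], [2, 3, 4])

def Spec_solution (orders : List String) (course : List Int) (out : List String) : Prop := out = solution_alt orders course
instance (orders : List String) (course : List Int) (out : List String) : Decidable (Spec_solution orders course out) := by unfold Spec_solution; infer_instance

-- ===== CLAIM (what is proved, stated in full; the proofs are below) =====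
def Claim_equal_solution : Prop := ∀ (orders : List String) (course : List Int), Dom_solution orders course → Pre_solution orders course → Spec_solution orders course (solution orders course)

-- ===== LEMMAS AND PROOFS =====

-- all combos of size n over all orders, in encounter order
def tempOf (orders : List String) (n : Nat) : List (List Char) :=
  orders.flatMap (fun o => PySem.List.combinations (PySem.List.sorted o.toList (fun x => x) false) n)

-- A's per-size contribution to answer
def segA (orders : List String) (n : Nat) : List String :=
  let temp := tempOf orders n
  if temp ≠ [] then
    let orderCount := PySem.Dict.counter temp
    match PySem.List.max? orderCount.values (fun v => v) with
    | some max_ =>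
      if 2 ≤ max_ then
        (orderCount.items.filter (fun kv => decide (kv.2 = max_))).map (fun kv => String.ofList kv.1)
      else []
    | none => []
  else []

-- B's per-size contribution to answer
def segB (orders : List String) (n : Nat) : List String :=
  let gs : List (List Char × Int) := groupsOf (PySem.List.sorted (tempOf orders n) (fun x => x) false)
  let best : Int := gs.foldl (fun a g => max a g.2) 0
  if 2 ≤ best then
    ((gs.filter (fun g => decide (g.2 = best))).map Prod.fst).map String.ofList
  else []

-- one step of A's loop appends segA
lemma bodyA_eq (orders : List String) (c : Int) (answer : List String) :
    (if (orders.foldl (fun temp order =>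
          temp ++ PySem.List.combinations (PySem.List.sorted order.toList (fun x => x) false) c.toNat) []) ≠ [] then
      match PySem.List.max?
          (PySem.Dict.counter (orders.foldl (fun temp order =>
            temp ++ PySem.List.combinations (PySem.List.sorted order.toList (fun x => x) false) c.toNat) [])).values
          (fun v => v) with
      | some max_ =>
        if 2 ≤ max_ then
          (PySem.Dict.counter (orders.foldl (fun temp order =>
            temp ++ PySem.List.combinations (PySem.List.sorted order.toList (fun x => x) false) c.toNat) [])).items.foldl
            (fun ans kv =>
              if (PySem.Dict.counter (orders.foldl (fun temp order =>
                    temp ++ PySem.List.combinations (PySem.List.sorted order.toList (fun x => x) false) c.toNat) [])).getD kv.1 0 = max_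
              then ans ++ [String.ofList kv.1] else ans)
            answer
        else answer
      | none => answer
    else answer) = answer ++ segA orders c.toNat := by
  rw [show orders.foldl (fun temp order =>
        temp ++ PySem.List.combinations (PySem.List.sorted order.toList (fun x => x) false) c.toNat) []
      = tempOf orders c.toNat from by
        simpa [tempOf] using
          PySem.List.foldl_append_eq_flatMap
            (g := fun o => PySem.List.combinations (PySem.List.sorted o.toList (fun x => x) false) c.toNat)
            (l := orders) (acc := [])]
  unfold segA
  by_cases htemp : tempOf orders c.toNat = []
  · simp [htemp]
  · simp only [ne_eq, htemp, not_false_eq_true, if_pos]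
    cases hmax : PySem.List.max? (PySem.Dict.counter (tempOf orders c.toNat)).values (fun v => v) with
    | none => simp
    | some max_ =>
      by_cases h2 : 2 ≤ max_
      · simp only [h2, if_true]
        rw [PySem.List.foldl_congr_mem _
              _ (fun ans kv => if kv.2 = max_ then ans ++ [String.ofList kv.1] else ans) _
              (by
                intro acc kv hkv
                have hkv' : ((kv.1, kv.2) : (List Char) × Int)
                    ∈ (PySem.Dict.counter (tempOf orders c.toNat)).items := by simpa using hkv
                rw [PySem.Dict.getD_of_mem_items _ hkv' (PySem.Dict.nodup_keys_counter _)])]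
        rw [PySem.List.foldl_append_ite (p := fun kv : (List Char) × Int => kv.2 = max_)
              (f := fun kv : (List Char) × Int => String.ofList kv.1)]
      · simp [h2]

-- A's whole loop appends the segA segments
lemma foldlA_eq (orders : List String) : ∀ (cs : List Int) (answer : List String),
    cs.foldl (fun answer c =>
      if (orders.foldl (fun temp order =>
            temp ++ PySem.List.combinations (PySem.List.sorted order.toList (fun x => x) false) c.toNat) []) ≠ [] then
        match PySem.List.max?
            (PySem.Dict.counter (orders.foldl (fun temp order =>
              temp ++ PySem.List.combinations (PySem.List.sorted order.toList (fun x => x) false) c.toNat) [])).values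
            (fun v => v) with
        | some max_ =>
          if 2 ≤ max_ then
            (PySem.Dict.counter (orders.foldl (fun temp order =>
              temp ++ PySem.List.combinations (PySem.List.sorted order.toList (fun x => x) false) c.toNat) [])).items.foldl
              (fun ans kv =>
                if (PySem.Dict.counter (orders.foldl (fun temp order =>
                      temp ++ PySem.List.combinations (PySem.List.sorted order.toList (fun x => x) false) c.toNat) [])).getD kv.1 0 = max_
                then ans ++ [String.ofList kv.1] else ans)
              answer
          else answer
        | none => answer
      else answer) answer
    = cs.foldl (fun a c => a ++ segA orders c.toNat) answer := by
  intro cs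
  induction cs with
  | nil => intro answer; rfl
  | cons c cs ih =>
    intro answer
    simp only [List.foldl_cons]
    rw [ih, bodyA_eq]

-- the best/winners scan characterised: best is the running max of the run lengths,
-- winners are the keys of the runs attaining it (plus the initial list if unbeaten)
lemma scan_spec (gs : List (List Char × Int)) (b : Int) (w : List (List Char)) :
    gs.foldl
      (fun (bw : Int × List (List Char)) g =>
        if bw.1 < g.2 then (g.2, [g.1])
        else if g.2 = bw.1 then (bw.1, bw.2 ++ [g.1])
        else bw) (b, w)
    = (gs.foldl (fun a g => max a g.2) b,
       (if gs.foldl (fun a g => max a g.2) b = b then w else []) ++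
         (gs.filter (fun g => decide (g.2 = gs.foldl (fun a g => max a g.2) b))).map Prod.fst) := by
  induction gs generalizing b w with
  | nil => simp
  | cons g rest ih =>
    obtain ⟨k, r⟩ := g
    simp only [List.foldl_cons, List.filter_cons]
    by_cases h1 : b < r
    · simp only [if_pos h1]
      rw [ih]
      have hbr : max b r = r := by omega
      simp only [hbr]
      have hrM : r ≤ rest.foldl (fun a g => max a g.2) r :=
        (PySem.List.le_foldl_max_int rest Prod.snd r).1
      have hMb : ¬ (rest.foldl (fun a g => max a g.2) r = b) := by omega
      simp only [if_neg hMb]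
      by_cases hr : r = rest.foldl (fun a g => max a g.2) r
      · simp [← hr]
      · simp [hr, Ne.symm hr]
    · simp only [if_neg h1]
      by_cases h2 : r = b
      · simp only [if_pos h2]
        rw [ih]
        have hbr : max b r = b := by omega
        simp only [hbr]
        by_cases hM : rest.foldl (fun a g => max a g.2) b = b
        · have hrM : r = rest.foldl (fun a g => max a g.2) b := by omega
          simp [hM, hrM]
        · have : ¬ (r = rest.foldl (fun a g => max a g.2) b) := by omega
          simp [hM, this]
      · simp only [if_neg h2]
        rw [ih]
        have hbr : max b r = b := by omega
        simp only [hbr]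
        have hrb : r < b := by omega
        have hbM : b ≤ rest.foldl (fun a g => max a g.2) b :=
          (PySem.List.le_foldl_max_int rest Prod.snd b).1
        have : ¬ (r = rest.foldl (fun a g => max a g.2) b) := by omega
        simp [this]

-- one step of B's loop appends segB
lemma bodyB_eq (orders : List String) (c : Int) (answer : List String) :
    (if 2 ≤ ((groupsOf (PySem.List.sorted
              ((orders.map (fun o => PySem.List.sorted o.toList (fun x => x) false)).flatMap
                (fun m => PySem.List.combinations m c.toNat)) (fun x => x) false)).foldl
            (fun (bw : Int × List (List Char)) g =>
              if bw.1 < g.2 then (g.2, [g.1])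
              else if g.2 = bw.1 then (bw.1, bw.2 ++ [g.1])
              else bw) (0, [])).1 then
      answer ++ ((groupsOf (PySem.List.sorted
              ((orders.map (fun o => PySem.List.sorted o.toList (fun x => x) false)).flatMap
                (fun m => PySem.List.combinations m c.toNat)) (fun x => x) false)).foldl
            (fun (bw : Int × List (List Char)) g =>
              if bw.1 < g.2 then (g.2, [g.1])
              else if g.2 = bw.1 then (bw.1, bw.2 ++ [g.1])
              else bw) (0, [])).2.map (fun w => String.ofList w)
    else answer) = answer ++ segB orders c.toNat := by
  rw [show (orders.map (fun o => PySem.List.sorted o.toList (fun x => x) false)).flatMap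
        (fun m => PySem.List.combinations m c.toNat) = tempOf orders c.toNat from by
      rw [List.flatMap_map]; rfl]
  rw [scan_spec]
  unfold segB
  simp only [ite_self, List.nil_append]
  split
  · rfl
  · simp

-- B's whole loop appends the segB segments
lemma foldlB_eq (orders : List String) : ∀ (cs : List Int) (answer : List String),
    cs.foldl (fun answer c =>
      if 2 ≤ ((groupsOf (PySem.List.sorted
                ((orders.map (fun o => PySem.List.sorted o.toList (fun x => x) false)).flatMap
                  (fun m => PySem.List.combinations m c.toNat)) (fun x => x) false)).foldl
              (fun (bw : Int × List (List Char)) g =>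
                if bw.1 < g.2 then (g.2, [g.1])
                else if g.2 = bw.1 then (bw.1, bw.2 ++ [g.1])
                else bw) (0, [])).1 then
        answer ++ ((groupsOf (PySem.List.sorted
                ((orders.map (fun o => PySem.List.sorted o.toList (fun x => x) false)).flatMap
                  (fun m => PySem.List.combinations m c.toNat)) (fun x => x) false)).foldl
              (fun (bw : Int × List (List Char)) g =>
                if bw.1 < g.2 then (g.2, [g.1])
                else if g.2 = bw.1 then (bw.1, bw.2 ++ [g.1])
                else bw) (0, [])).2.map (fun w => String.ofList w)
      else answer) answer
    = cs.foldl (fun a c => a ++ segB orders c.toNat) answer := by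
  intro cs
  induction cs with
  | nil => intro answer; rfl
  | cons c cs ih =>
    intro answer
    simp only [List.foldl_cons]
    rw [ih, bodyB_eq]

-- groupsOf of a sorted list: run lengths are counts, keys are the distinct elements
lemma groups_spec : ∀ ys : List (List Char), ys.Pairwise (· ≤ ·) →
    (∀ p ∈ groupsOf ys, p.2 = (ys.count p.1 : Int)) ∧
    (∀ k, k ∈ (groupsOf ys).map Prod.fst ↔ k ∈ ys) ∧
    ((groupsOf ys).map Prod.fst).Nodup
  | [], _ => by simp [groupsOf]
  | y :: rest, h => by
    have hpw_rest : rest.Pairwise (· ≤ ·) := (List.pairwise_cons.mp h).2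
    have hy_le : ∀ a ∈ rest, y ≤ a := (List.pairwise_cons.mp h).1
    have hdw_sub : List.Sublist (rest.dropWhile (fun z => z == y)) rest := List.dropWhile_sublist _
    have hpw_dw : (rest.dropWhile (fun z => z == y)).Pairwise (· ≤ ·) := hpw_rest.sublist hdw_sub
    have hynot : y ∉ rest.dropWhile (fun z => z == y) := by
      intro hy
      cases hdw : rest.dropWhile (fun z => z == y) with
      | nil => rw [hdw] at hy; simp at hy
      | cons z t =>
        have hz := List.head_dropWhile_not (fun z => z == y) (l := rest) (by simp [hdw])
        simp only [hdw, List.head_cons] at hz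
        have hzy : z ≠ y := by simpa using hz
        have hz_mem : z ∈ rest := hdw_sub.mem (by simp [hdw])
        have h1 : y ≤ z := hy_le z hz_mem
        rw [hdw] at hy
        have hpw_dw' := hpw_dw
        rw [hdw] at hpw_dw'
        rcases List.mem_cons.mp hy with h' | h'
        · exact hzy h'.symm
        · exact hzy (le_antisymm ((List.pairwise_cons.mp hpw_dw').1 y h') h1)
    have IH := groups_spec (rest.dropWhile (fun z => z == y)) hpw_dw
    obtain ⟨IH1, IH2, IH3⟩ := IH
    have htw_mem : ∀ b ∈ rest.takeWhile (fun z => z == y), b = y := by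
      intro b hb
      have := List.mem_takeWhile_imp hb
      simpa using this
    have hsplit : rest.takeWhile (fun z => z == y) ++ rest.dropWhile (fun z => z == y) = rest :=
      List.takeWhile_append_dropWhile
    have hcounty : (y :: rest).count y = (rest.takeWhile (fun z => z == y)).length + 1 := by
      have htwc : (rest.takeWhile (fun z => z == y)).count y
          = (rest.takeWhile (fun z => z == y)).length :=
        List.count_eq_length.mpr (fun b hb => (htw_mem b hb).symm)
      have hdwc : (rest.dropWhile (fun z => z == y)).count y = 0 := List.count_eq_zero.mpr hynot
      calc (y :: rest).count y = rest.count y + 1 := by simp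
        _ = (rest.takeWhile (fun z => z == y) ++ rest.dropWhile (fun z => z == y)).count y + 1 := by
              rw [hsplit]
        _ = (rest.takeWhile (fun z => z == y)).length + 1 := by
              rw [List.count_append, htwc, hdwc]
    have hmem_dw_rest : ∀ k, k ∈ rest.dropWhile (fun z => z == y) → k ∈ rest := fun k hk => hdw_sub.mem hk
    have hmem_rest_dw : ∀ k, k ≠ y → k ∈ rest → k ∈ rest.dropWhile (fun z => z == y) := by
      intro k hky hk
      rw [← hsplit] at hk
      rcases List.mem_append.mp hk with h' | h'
      · exact absurd (htw_mem k h') hky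
      · exact h'
    refine ⟨?_, ?_, ?_⟩
    · intro p hp
      rw [groupsOf] at hp
      rcases List.mem_cons.mp hp with h' | h'
      · subst h'
        simp only []
        rw [hcounty]
        push_cast
        ring
      · have hfst : p.1 ∈ rest.dropWhile (fun z => z == y) :=
          (IH2 p.1).mp (List.mem_map_of_mem h')
        have hne : p.1 ≠ y := fun he => hynot (he ▸ hfst)
        have htwc0 : (rest.takeWhile (fun z => z == y)).count p.1 = 0 :=
          List.count_eq_zero.mpr (fun hmem => hne (htw_mem _ hmem))
        have : (y :: rest).count p.1 = (rest.dropWhile (fun z => z == y)).count p.1 := by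
          rw [List.count_cons_of_ne (Ne.symm hne)]
          conv_lhs => rw [← hsplit]
          rw [List.count_append, htwc0, Nat.zero_add]
        rw [IH1 p h', this]
    · intro k
      rw [groupsOf]
      simp only [List.map_cons, List.mem_cons, IH2]
      constructor
      · rintro (h' | h')
        · exact Or.inl h'
        · exact Or.inr (hmem_dw_rest k h')
      · rintro (h' | h')
        · exact Or.inl h'
        · by_cases hky : k = y
          · exact Or.inl hky
          · exact Or.inr (hmem_rest_dw k hky h')
    · rw [groupsOf]
      simp only [List.map_cons, List.nodup_cons]
      exact ⟨fun hy => hynot ((IH2 y).mp hy), IH3⟩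
termination_by ys => ys.length
decreasing_by
  exact Nat.lt_succ_of_le (List.length_dropWhile_le _ _)

-- bounding the running max of the run lengths
lemma foldl_max_le (m : Int) : ∀ (gs : List (List Char × Int)) (a : Int), a ≤ m →
    (∀ g ∈ gs, g.2 ≤ m) → gs.foldl (fun a g => max a g.2) a ≤ m
  | [], a, ha, _ => ha
  | g :: rest, a, ha, hub =>
      foldl_max_le m rest (max a g.2)
        (by have := hub g (List.mem_cons_self); omega)
        (fun g' hg' => hub g' (List.mem_cons_of_mem _ hg'))

-- the sorted combos list is ≤-sorted (transfer from the library's LinearOrder instance,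
-- whose lexicographic < is propositionally the core List.lt used by the port's sorted)
lemma sorted_pairwise_core (xs : List (List Char)) :
    (PySem.List.sorted xs (fun x => x) false).Pairwise (· ≤ ·) := by
  have he : PySem.List.sorted xs (fun x => x) false
      = @PySem.List.sorted (List Char) (List Char) List.instLinearOrder.toLT
          LinearOrder.toDecidableLT xs (fun x => x) false := by
    rw [PySem.List.sorted_eq_foldl_insertBy,
        @PySem.List.sorted_eq_foldl_insertBy (List Char) (List Char) List.instLinearOrder.toLT
          LinearOrder.toDecidableLT]
    congr 1
    funext acc x
    congr 1
    funext a b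
    exact decide_eq_decide.mpr (List.lt_iff_lex_lt a b)
  rw [he]
  exact PySem.List.sorted_pairwise xs (fun x => x)

-- the per-size contributions agree up to permutation
lemma segA_perm_segB (orders : List String) (n : Nat) : (segA orders n).Perm (segB orders n) := by
  by_cases htemp : tempOf orders n = []
  · unfold segA segB
    simp [htemp, groupsOf,
      show PySem.List.sorted ([] : List (List Char)) (fun x => x) false = [] from rfl]
  · have hpw : (PySem.List.sorted (tempOf orders n) (fun x => x) false).Pairwise (· ≤ ·) :=
      sorted_pairwise_core (tempOf orders n)
    have hperm : (PySem.List.sorted (tempOf orders n) (fun x => x) false).Perm (tempOf orders n) :=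
      PySem.List.sorted_perm (tempOf orders n) (fun x => x) false
    obtain ⟨G1, G2, G3⟩ := groups_spec _ hpw
    -- counts in the sorted list are counts in temp
    have hcnt : ∀ k, (PySem.List.sorted (tempOf orders n) (fun x => x) false).count k
        = (tempOf orders n).count k := fun k => hperm.count_eq k
    -- the counter's value list
    have hvalues : (PySem.Dict.counter (tempOf orders n)).values
        = (PySem.Set.ofList (tempOf orders n)).map (fun k => ((tempOf orders n).count k : Int)) := by
      show ((PySem.Dict.counter (tempOf orders n)).items.map Prod.snd) = _
      rw [PySem.Dict.items_counter, List.map_map]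
      rfl
    obtain ⟨x, hx⟩ := List.exists_mem_of_ne_nil _ htemp
    have hvne : (PySem.Dict.counter (tempOf orders n)).values ≠ [] := by
      rw [hvalues]
      intro hcon
      rw [List.map_eq_nil_iff] at hcon
      exact (by simpa [hcon] using (PySem.Set.mem_ofList (tempOf orders n) x).mpr hx)
    cases hmax : PySem.List.max? (PySem.Dict.counter (tempOf orders n)).values (fun v => v) with
    | none => exact absurd ((PySem.List.max?_eq_none_iff _ _).mp hmax) hvne
    | some m =>
      have hm_mem : m ∈ (PySem.Dict.counter (tempOf orders n)).values := PySem.List.max?_mem hmax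
      have hm_ub : ∀ v ∈ (PySem.Dict.counter (tempOf orders n)).values, v ≤ m :=
        PySem.List.max?_isMax hmax
      -- every run length appears among the counter's values
      have hsnd_mem : ∀ g ∈ groupsOf (PySem.List.sorted (tempOf orders n) (fun x => x) false),
          g.2 ∈ (PySem.Dict.counter (tempOf orders n)).values := by
        intro g hg
        have h1 : g.1 ∈ tempOf orders n := by
          have := (G2 g.1).mp (List.mem_map_of_mem hg)
          exact hperm.mem_iff.mp this
        rw [G1 g hg, hcnt, hvalues]
        exact List.mem_map_of_mem ((PySem.Set.mem_ofList _ _).mpr h1)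
      -- m is attained by some run
      obtain ⟨k0, hk0s, hk0v'⟩ := List.mem_map.mp (by rw [hvalues] at hm_mem; exact hm_mem)
      have hk0v : ((tempOf orders n).count k0 : Int) = m := by simpa using hk0v'
      have hk0t : k0 ∈ tempOf orders n := (PySem.Set.mem_ofList _ _).mp hk0s
      have hk0g : k0 ∈ (groupsOf (PySem.List.sorted (tempOf orders n) (fun x => x) false)).map Prod.fst :=
        (G2 k0).mpr (hperm.mem_iff.mpr hk0t)
      obtain ⟨g0, hg0, hg0k⟩ := List.mem_map.mp hk0g
      have hg0v : g0.2 = m := by rw [G1 g0 hg0, hg0k, hcnt, hk0v]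
      -- best = m
      have hbest : (groupsOf (PySem.List.sorted (tempOf orders n) (fun x => x) false)).foldl
          (fun a g => max a g.2) 0 = m := by
        have hub : ∀ g ∈ groupsOf (PySem.List.sorted (tempOf orders n) (fun x => x) false), g.2 ≤ m :=
          fun g hg => hm_ub _ (hsnd_mem g hg)
        have hm0 : (0 : Int) ≤ m := by
          have : (1 : Int) ≤ ((tempOf orders n).count k0 : Int) := by
            exact_mod_cast List.count_pos_iff.mpr hk0t
          omega
        have hle := foldl_max_le m _ 0 hm0 hub
        have hge : m ≤ _ :=
          le_trans (le_of_eq hg0v.symm)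
            ((PySem.List.le_foldl_max_int
              (groupsOf (PySem.List.sorted (tempOf orders n) (fun x => x) false)) Prod.snd 0).2 g0 hg0)
        omega
      -- both segments
      unfold segA segB
      simp only [ne_eq, htemp, not_false_eq_true, if_pos, hmax, hbest]
      by_cases h2 : 2 ≤ m
      · simp only [h2, if_true]
        rw [show (fun kv : (List Char) × Int => String.ofList kv.1)
              = String.ofList ∘ Prod.fst from rfl, ← List.map_map]
        refine List.Perm.map String.ofList ?_
        -- the two key lists are Nodup with the same members
        have hKA_nodup : (((PySem.Dict.counter (tempOf orders n)).items.filter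
            (fun kv => decide (kv.2 = m))).map Prod.fst).Nodup := by
          have hsub : List.Sublist
              (((PySem.Dict.counter (tempOf orders n)).items.filter
                (fun kv => decide (kv.2 = m))).map Prod.fst)
              ((PySem.Dict.counter (tempOf orders n)).items.map Prod.fst) :=
            List.Sublist.map Prod.fst List.filter_sublist
          exact (PySem.Dict.nodup_keys_counter (tempOf orders n)).sublist hsub
        have hKB_nodup : (((groupsOf (PySem.List.sorted (tempOf orders n) (fun x => x) false)).filter
            (fun g => decide (g.2 = m))).map Prod.fst).Nodup := by
          have hsub : List.Sublist
              (((groupsOf (PySem.List.sorted (tempOf orders n) (fun x => x) false)).filter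
                (fun g => decide (g.2 = m))).map Prod.fst)
              ((groupsOf (PySem.List.sorted (tempOf orders n) (fun x => x) false)).map Prod.fst) :=
            List.Sublist.map Prod.fst List.filter_sublist
          exact G3.sublist hsub
        refine (List.perm_ext_iff_of_nodup hKA_nodup hKB_nodup).mpr ?_
        intro k
        constructor
        · intro hk
          obtain ⟨kv, hkvf, hkv1⟩ := List.mem_map.mp hk
          obtain ⟨hkv_items, hkv2⟩ := List.mem_filter.mp hkvf
          rw [PySem.Dict.items_counter] at hkv_items
          obtain ⟨k', hk's, hk'e⟩ := List.mem_map.mp hkv_items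
          have hk'k : k' = k := by rw [← hkv1, ← hk'e]
          subst hk'k
          have hkc : ((tempOf orders n).count k' : Int) = m := by
            have := of_decide_eq_true hkv2
            rw [← hk'e] at this
            exact this
          have hk'g : k' ∈ (groupsOf (PySem.List.sorted (tempOf orders n) (fun x => x) false)).map Prod.fst :=
            (G2 k').mpr (hperm.mem_iff.mpr ((PySem.Set.mem_ofList _ _).mp hk's))
          obtain ⟨g, hg, hgk⟩ := List.mem_map.mp hk'g
          refine List.mem_map.mpr ⟨g, List.mem_filter.mpr ⟨hg, ?_⟩, hgk⟩
          rw [decide_eq_true_iff, G1 g hg, hgk, hcnt, hkc]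
        · intro hk
          obtain ⟨g, hgf, hg1⟩ := List.mem_map.mp hk
          obtain ⟨hg_mem, hg2⟩ := List.mem_filter.mp hgf
          have hgc : ((tempOf orders n).count k : Int) = m := by
            have := of_decide_eq_true hg2
            rw [G1 g hg_mem, hg1, hcnt] at this
            exact this
          have hkt : k ∈ tempOf orders n := by
            have : k ∈ PySem.List.sorted (tempOf orders n) (fun x => x) false := by
              have := (G2 g.1).mp (List.mem_map_of_mem hg_mem)
              rw [hg1] at this
              exact this
            exact hperm.mem_iff.mp this
          refine List.mem_map.mpr ⟨(k, ((tempOf orders n).count k : Int)), List.mem_filter.mpr ⟨?_, ?_⟩, rfl⟩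
          · rw [PySem.Dict.items_counter]
            exact List.mem_map_of_mem ((PySem.Set.mem_ofList _ _).mpr hkt)
          · rw [decide_eq_true_iff]
            exact hgc
      · simp [h2]

-- folding perm-related segments from perm-related accumulators gives perm-related answers
lemma foldl_seg_perm (orders : List String) : ∀ (cs : List Int) (aA aB : List String),
    aA.Perm aB →
    (cs.foldl (fun a c => a ++ segA orders c.toNat) aA).Perm
      (cs.foldl (fun a c => a ++ segB orders c.toNat) aB)
  | [], aA, aB, h => h
  | c :: cs, aA, aB, h =>
      foldl_seg_perm orders cs _ _ (h.append (segA_perm_segB orders c.toNat))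

-- ===== VERDICT (by name: the statement is the Claim_ definition above) =====
theorem solution_spec : Claim_equal_solution := by
  intro orders course _ _
  unfold Spec_solution
  simp only [solution, solution_alt]
  rw [foldlA_eq orders course, foldlB_eq orders course]
  exact (PySem.List.sorted_id_eq_sorted_id_iff_perm _ _).mpr
    (foldl_seg_perm orders course [] [] (List.Perm.refl _))
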